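-- pv_equiv track=rewrite | github.com/Limaeduardo7/whatsapp-ai-agent | src/services.py | language_from_phone
-- ===== SOURCE A (Python) =====
-- def language_from_phone(phone: str | None) -> str | None:
--     digits = "".join(ch for ch in str(phone or "") if ch.isdigit())
--     if len(digits) < 2:
--         return None
--
--     # Priority by known DDI ranges for this operation
--     if digits.startswith("55"):
--         return "pt-BR"
--
--     es_prefixes = (
--         "52", "54", "57", "56", "51", "58", "53", "34", "591", "595", "593", "598", "502", "503", "504", "505", "506", "507", "1"
--     )
--     en_prefixes = ("1", "44", "61", "49")
--
--     # Specific latin DDIs first (except ambiguous 1)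
--     for p in es_prefixes:
--         if p != "1" and digits.startswith(p):
--             return "es"
--     for p in en_prefixes:
--         if p != "1" and digits.startswith(p):
--             return "en"
--
--     # Ambiguous NANP (+1): fallback to EN
--     if digits.startswith("1"):
--         return "en"
--
--     return None
-- ===== SOURCE B (Python) =====
-- PREFIX_LANG = {
--     "55": "pt-BR",
--     "52": "es", "54": "es", "57": "es", "56": "es", "51": "es", "58": "es",
--     "53": "es", "34": "es",
--     "591": "es", "595": "es", "593": "es", "598": "es",
--     "502": "es", "503": "es", "504": "es", "505": "es", "506": "es", "507": "es",
--     "44": "en", "61": "en", "49": "en",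
--     "1": "en",
-- }
--
--
-- def language_from_phone(phone: str | None) -> str | None:
--     digits = "".join(ch for ch in str(phone or "") if ch.isdigit())
--     if len(digits) < 2:
--         return None
--     # longest-prefix lookup: 3-digit keys first so '591'/'50x' are not shadowed
--     for key in (digits[:3], digits[:2], digits[:1]):
--         if key in PREFIX_LANG:
--             return PREFIX_LANG[key]
--     return None
-- ===== Notes on version B (the rewrite author's own statement) =====
-- stated objective: idiomatic
-- what changed: Replaces the hard-coded branch/loop prefix scans with one prefix->language dict and a longest-first lookup of digits[:3], digits[:2], digits[:1].
import Mathlib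
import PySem

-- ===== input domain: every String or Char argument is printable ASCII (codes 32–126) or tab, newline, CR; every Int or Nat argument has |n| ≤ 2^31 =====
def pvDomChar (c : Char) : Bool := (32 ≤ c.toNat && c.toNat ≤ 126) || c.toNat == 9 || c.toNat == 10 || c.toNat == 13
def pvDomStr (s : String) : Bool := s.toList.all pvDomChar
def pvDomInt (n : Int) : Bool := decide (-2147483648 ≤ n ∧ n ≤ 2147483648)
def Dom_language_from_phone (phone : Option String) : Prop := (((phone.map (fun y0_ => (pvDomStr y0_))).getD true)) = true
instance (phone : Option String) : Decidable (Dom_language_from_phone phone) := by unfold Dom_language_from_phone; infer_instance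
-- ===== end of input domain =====

-- B is the same task written the idiomatic way: one prefix->language dict and a
-- longest-first lookup of digits[:3]/[:2]/[:1] instead of A's branch/loop prefix scans.

-- ===== PORT A =====
-- the two 'for p in …: if p != "1" and digits.startswith(p): return …' loops
def pvScanA (digits : List Char) : List (List Char) → Bool
  | [] => false
  | p :: ps =>
      if p != ['1'] && PySem.Chars.startswith digits p then true else pvScanA digits ps

-- A's body after the digit-extraction preamble
def pvCoreA (digits : List Char) : Option String :=
  if digits.length < 2 then none
  else if PySem.Chars.startswith digits ['5','5'] then some "pt-BR"
  else
    let es : List (List Char) :=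
      [['5','2'],['5','4'],['5','7'],['5','6'],['5','1'],['5','8'],['5','3'],['3','4'],
       ['5','9','1'],['5','9','5'],['5','9','3'],['5','9','8'],
       ['5','0','2'],['5','0','3'],['5','0','4'],['5','0','5'],['5','0','6'],['5','0','7'],['1']]
    let en : List (List Char) := [['1'],['4','4'],['6','1'],['4','9']]
    if pvScanA digits es then some "es"
    else if pvScanA digits en then some "en"
    else if PySem.Chars.startswith digits ['1'] then some "en"
    else none

def language_from_phone (phone : Option String) : Option String :=
  pvCoreA ((phone.getD "").toList.filter PySem.Chars.isdigit)

-- ===== PORT B =====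
-- Source B's module-level PREFIX_LANG dict
def pvPrefixTable : PySem.Dict (List Char) String :=
  PySem.Dict.ofList
    [(['5','5'],"pt-BR"),
     (['5','2'],"es"),(['5','4'],"es"),(['5','7'],"es"),(['5','6'],"es"),(['5','1'],"es"),
     (['5','8'],"es"),(['5','3'],"es"),(['3','4'],"es"),
     (['5','9','1'],"es"),(['5','9','5'],"es"),(['5','9','3'],"es"),(['5','9','8'],"es"),
     (['5','0','2'],"es"),(['5','0','3'],"es"),(['5','0','4'],"es"),(['5','0','5'],"es"),
     (['5','0','6'],"es"),(['5','0','7'],"es"),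
     (['4','4'],"en"),(['6','1'],"en"),(['4','9'],"en"),
     (['1'],"en")]

-- Source B's 'for key in (…): if key in PREFIX_LANG: return PREFIX_LANG[key]' loop
def pvLookupB : List (List Char) → Option String
  | [] => none
  | k :: ks =>
      match pvPrefixTable.get? k with
      | some v => some v
      | none => pvLookupB ks

-- Source B's body after the digit-extraction preamble
def pvCoreB (digits : List Char) : Option String :=
  if digits.length < 2 then none
  else
    pvLookupB [PySem.Chars.slice digits none (some 3),
               PySem.Chars.slice digits none (some 2),
               PySem.Chars.slice digits none (some 1)]

def language_from_phone_alt (phone : Option String) : Option String :=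
  pvCoreB ((phone.getD "").toList.filter PySem.Chars.isdigit)

-- ===== PRECONDITION & SPEC =====
def Spec_language_from_phone (phone : Option String) (out : Option String) : Prop := out = language_from_phone_alt phone
instance (phone : Option String) (out : Option String) : Decidable (Spec_language_from_phone phone out) := by unfold Spec_language_from_phone; infer_instance

-- ===== CLAIM (what is proved, stated in full; the proofs are below) =====
def Claim_equal_language_from_phone : Prop := ∀ (phone : Option String), Dom_language_from_phone phone → Spec_language_from_phone phone (language_from_phone phone)

-- ===== LEMMAS AND PROOFS =====

theorem pvItems : pvPrefixTable.items =
    [(['5','5'],"pt-BR"),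
     (['5','2'],"es"),(['5','4'],"es"),(['5','7'],"es"),(['5','6'],"es"),(['5','1'],"es"),
     (['5','8'],"es"),(['5','3'],"es"),(['3','4'],"es"),
     (['5','9','1'],"es"),(['5','9','5'],"es"),(['5','9','3'],"es"),(['5','9','8'],"es"),
     (['5','0','2'],"es"),(['5','0','3'],"es"),(['5','0','4'],"es"),(['5','0','5'],"es"),
     (['5','0','6'],"es"),(['5','0','7'],"es"),
     (['4','4'],"en"),(['6','1'],"en"),(['4','9'],"en"),
     (['1'],"en")] := by decide

theorem s3 (xs : List Char) : PySem.List.slice xs none (some 3) = xs.take 3 := by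
  simpa using PySem.List.slice_to_natCast xs 3
theorem s2 (xs : List Char) : PySem.List.slice xs none (some 2) = xs.take 2 := by
  simpa using PySem.List.slice_to_natCast xs 2
theorem s1 (xs : List Char) : PySem.List.slice xs none (some 1) = xs.take 1 := by
  simpa using PySem.List.slice_to_natCast xs 1

theorem pvBeqF {α : Type} [BEq α] [LawfulBEq α] {a b : α} (h : ¬ b = a) : (a == b) = false := by
  simp; exact fun e => h e.symm
theorem pvBeqF' {α : Type} [BEq α] [LawfulBEq α] {a b : α} (h : ¬ b = a) : (b == a) = false := by
  simp [h]

theorem pvCore_eq (d : List Char) : pvCoreA d = pvCoreB d := by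
  match d with
  | [] => rfl
  | [a] => rfl
  | a :: b :: rest =>
    by_cases h5 : a = '5'
    · subst h5
      by_cases hb5 : b = '5'
      · subst hb5; cases rest <;>
          simp [pvCoreA, pvCoreB, pvScanA, pvLookupB, PySem.Dict.get?, pvItems, s1, s2, s3, PySem.Chars.startswith, List.isPrefixOf, List.find?, List.find?_cons_of_neg, List.find?_cons_of_pos]
      · by_cases hb9 : b = '9'
        · subst hb9
          rcases rest with _ | ⟨c, rest⟩
          · simp [pvCoreA, pvCoreB, pvScanA, pvLookupB, PySem.Dict.get?, pvItems, s1, s2, s3, PySem.Chars.startswith, List.isPrefixOf, List.find?, List.find?_cons_of_neg, List.find?_cons_of_pos, hb5, Ne.symm hb5, pvBeqF hb5, pvBeqF' hb5]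
          · by_cases hc1 : c = '1'
            · subst hc1; simp [pvCoreA, pvCoreB, pvScanA, pvLookupB, PySem.Dict.get?, pvItems, s1, s2, s3, PySem.Chars.startswith, List.isPrefixOf, List.find?, List.find?_cons_of_neg, List.find?_cons_of_pos, hb5, Ne.symm hb5, pvBeqF hb5, pvBeqF' hb5]
            · by_cases hc5 : c = '5'
              · subst hc5; simp [pvCoreA, pvCoreB, pvScanA, pvLookupB, PySem.Dict.get?, pvItems, s1, s2, s3, PySem.Chars.startswith, List.isPrefixOf, List.find?, List.find?_cons_of_neg, List.find?_cons_of_pos, hb5, Ne.symm hb5, pvBeqF hb5, pvBeqF' hb5]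
              · by_cases hc3 : c = '3'
                · subst hc3; simp [pvCoreA, pvCoreB, pvScanA, pvLookupB, PySem.Dict.get?, pvItems, s1, s2, s3, PySem.Chars.startswith, List.isPrefixOf, List.find?, List.find?_cons_of_neg, List.find?_cons_of_pos, hb5, Ne.symm hb5, pvBeqF hb5, pvBeqF' hb5]
                · by_cases hc8 : c = '8'
                  · subst hc8; simp [pvCoreA, pvCoreB, pvScanA, pvLookupB, PySem.Dict.get?, pvItems, s1, s2, s3, PySem.Chars.startswith, List.isPrefixOf, List.find?, List.find?_cons_of_neg, List.find?_cons_of_pos, hb5, Ne.symm hb5, pvBeqF hb5, pvBeqF' hb5]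
                  · simp [pvCoreA, pvCoreB, pvScanA, pvLookupB, PySem.Dict.get?, pvItems, s1, s2, s3, PySem.Chars.startswith, List.isPrefixOf, List.find?, List.find?_cons_of_neg, List.find?_cons_of_pos, hb5, Ne.symm hb5, pvBeqF hb5, pvBeqF' hb5, hc1, Ne.symm hc1, pvBeqF hc1, pvBeqF' hc1, hc5, Ne.symm hc5, pvBeqF hc5, pvBeqF' hc5, hc3, Ne.symm hc3, pvBeqF hc3, pvBeqF' hc3, hc8, Ne.symm hc8, pvBeqF hc8, pvBeqF' hc8]
        · by_cases hb0 : b = '0'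
          · subst hb0
            rcases rest with _ | ⟨c, rest⟩
            · simp [pvCoreA, pvCoreB, pvScanA, pvLookupB, PySem.Dict.get?, pvItems, s1, s2, s3, PySem.Chars.startswith, List.isPrefixOf, List.find?, List.find?_cons_of_neg, List.find?_cons_of_pos, hb5, Ne.symm hb5, pvBeqF hb5, pvBeqF' hb5]
            · by_cases hc2 : c = '2'
              · subst hc2; simp [pvCoreA, pvCoreB, pvScanA, pvLookupB, PySem.Dict.get?, pvItems, s1, s2, s3, PySem.Chars.startswith, List.isPrefixOf, List.find?, List.find?_cons_of_neg, List.find?_cons_of_pos, hb5, Ne.symm hb5, pvBeqF hb5, pvBeqF' hb5]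
              · by_cases hc3 : c = '3'
                · subst hc3; simp [pvCoreA, pvCoreB, pvScanA, pvLookupB, PySem.Dict.get?, pvItems, s1, s2, s3, PySem.Chars.startswith, List.isPrefixOf, List.find?, List.find?_cons_of_neg, List.find?_cons_of_pos, hb5, Ne.symm hb5, pvBeqF hb5, pvBeqF' hb5]
                · by_cases hc4 : c = '4'
                  · subst hc4; simp [pvCoreA, pvCoreB, pvScanA, pvLookupB, PySem.Dict.get?, pvItems, s1, s2, s3, PySem.Chars.startswith, List.isPrefixOf, List.find?, List.find?_cons_of_neg, List.find?_cons_of_pos, hb5, Ne.symm hb5, pvBeqF hb5, pvBeqF' hb5]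
                  · by_cases hc5 : c = '5'
                    · subst hc5; simp [pvCoreA, pvCoreB, pvScanA, pvLookupB, PySem.Dict.get?, pvItems, s1, s2, s3, PySem.Chars.startswith, List.isPrefixOf, List.find?, List.find?_cons_of_neg, List.find?_cons_of_pos, hb5, Ne.symm hb5, pvBeqF hb5, pvBeqF' hb5]
                    · by_cases hc6 : c = '6'
                      · subst hc6; simp [pvCoreA, pvCoreB, pvScanA, pvLookupB, PySem.Dict.get?, pvItems, s1, s2, s3, PySem.Chars.startswith, List.isPrefixOf, List.find?, List.find?_cons_of_neg, List.find?_cons_of_pos, hb5, Ne.symm hb5, pvBeqF hb5, pvBeqF' hb5]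
                      · by_cases hc7 : c = '7'
                        · subst hc7; simp [pvCoreA, pvCoreB, pvScanA, pvLookupB, PySem.Dict.get?, pvItems, s1, s2, s3, PySem.Chars.startswith, List.isPrefixOf, List.find?, List.find?_cons_of_neg, List.find?_cons_of_pos, hb5, Ne.symm hb5, pvBeqF hb5, pvBeqF' hb5]
                        · simp [pvCoreA, pvCoreB, pvScanA, pvLookupB, PySem.Dict.get?, pvItems, s1, s2, s3, PySem.Chars.startswith, List.isPrefixOf, List.find?, List.find?_cons_of_neg, List.find?_cons_of_pos, hb5, Ne.symm hb5, pvBeqF hb5, pvBeqF' hb5, hc2, Ne.symm hc2, pvBeqF hc2, pvBeqF' hc2, hc3, Ne.symm hc3, pvBeqF hc3, pvBeqF' hc3, hc4, Ne.symm hc4, pvBeqF hc4, pvBeqF' hc4, hc5, Ne.symm hc5, pvBeqF hc5, pvBeqF' hc5, hc6, Ne.symm hc6, pvBeqF hc6, pvBeqF' hc6, hc7, Ne.symm hc7, pvBeqF hc7, pvBeqF' hc7]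
          · by_cases hb2 : b = '2'
            · subst hb2; cases rest <;> simp [pvCoreA, pvCoreB, pvScanA, pvLookupB, PySem.Dict.get?, pvItems, s1, s2, s3, PySem.Chars.startswith, List.isPrefixOf, List.find?, List.find?_cons_of_neg, List.find?_cons_of_pos]
            · by_cases hb4 : b = '4'
              · subst hb4; cases rest <;> simp [pvCoreA, pvCoreB, pvScanA, pvLookupB, PySem.Dict.get?, pvItems, s1, s2, s3, PySem.Chars.startswith, List.isPrefixOf, List.find?, List.find?_cons_of_neg, List.find?_cons_of_pos]
              · by_cases hb7 : b = '7'
                · subst hb7; cases rest <;> simp [pvCoreA, pvCoreB, pvScanA, pvLookupB, PySem.Dict.get?, pvItems, s1, s2, s3, PySem.Chars.startswith, List.isPrefixOf, List.find?, List.find?_cons_of_neg, List.find?_cons_of_pos]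
                · by_cases hb6 : b = '6'
                  · subst hb6; cases rest <;> simp [pvCoreA, pvCoreB, pvScanA, pvLookupB, PySem.Dict.get?, pvItems, s1, s2, s3, PySem.Chars.startswith, List.isPrefixOf, List.find?, List.find?_cons_of_neg, List.find?_cons_of_pos]
                  · by_cases hb1 : b = '1'
                    · subst hb1; cases rest <;> simp [pvCoreA, pvCoreB, pvScanA, pvLookupB, PySem.Dict.get?, pvItems, s1, s2, s3, PySem.Chars.startswith, List.isPrefixOf, List.find?, List.find?_cons_of_neg, List.find?_cons_of_pos]
                    · by_cases hb8 : b = '8'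
                      · subst hb8; cases rest <;> simp [pvCoreA, pvCoreB, pvScanA, pvLookupB, PySem.Dict.get?, pvItems, s1, s2, s3, PySem.Chars.startswith, List.isPrefixOf, List.find?, List.find?_cons_of_neg, List.find?_cons_of_pos]
                      · by_cases hb3 : b = '3'
                        · subst hb3; cases rest <;> simp [pvCoreA, pvCoreB, pvScanA, pvLookupB, PySem.Dict.get?, pvItems, s1, s2, s3, PySem.Chars.startswith, List.isPrefixOf, List.find?, List.find?_cons_of_neg, List.find?_cons_of_pos]
                        · cases rest <;> simp [pvCoreA, pvCoreB, pvScanA, pvLookupB, PySem.Dict.get?, pvItems, s1, s2, s3, PySem.Chars.startswith, List.isPrefixOf, List.find?, List.find?_cons_of_neg, List.find?_cons_of_pos, hb5, Ne.symm hb5, pvBeqF hb5, pvBeqF' hb5, hb9, Ne.symm hb9, pvBeqF hb9, pvBeqF' hb9, hb0, Ne.symm hb0, pvBeqF hb0, pvBeqF' hb0, hb2, Ne.symm hb2, pvBeqF hb2, pvBeqF' hb2, hb4, Ne.symm hb4, pvBeqF hb4, pvBeqF' hb4, hb7, Ne.symm hb7, pvBeqF hb7, pvBeqF' hb7, hb6,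 Ne.symm hb6, pvBeqF hb6, pvBeqF' hb6, hb1, Ne.symm hb1, pvBeqF hb1, pvBeqF' hb1, hb8, Ne.symm hb8, pvBeqF hb8, pvBeqF' hb8, hb3, Ne.symm hb3, pvBeqF hb3, pvBeqF' hb3]
    · by_cases h3 : a = '3'
      · subst h3
        by_cases hb4 : b = '4'
        · subst hb4; cases rest <;> simp [pvCoreA, pvCoreB, pvScanA, pvLookupB, PySem.Dict.get?, pvItems, s1, s2, s3, PySem.Chars.startswith, List.isPrefixOf, List.find?, List.find?_cons_of_neg, List.find?_cons_of_pos]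
        · cases rest <;> simp [pvCoreA, pvCoreB, pvScanA, pvLookupB, PySem.Dict.get?, pvItems, s1, s2, s3, PySem.Chars.startswith, List.isPrefixOf, List.find?, List.find?_cons_of_neg, List.find?_cons_of_pos, hb4, Ne.symm hb4, pvBeqF hb4, pvBeqF' hb4]
      · by_cases h4 : a = '4'
        · subst h4
          by_cases hb4 : b = '4'
          · subst hb4; cases rest <;> simp [pvCoreA, pvCoreB, pvScanA, pvLookupB, PySem.Dict.get?, pvItems, s1, s2, s3, PySem.Chars.startswith, List.isPrefixOf, List.find?, List.find?_cons_of_neg, List.find?_cons_of_pos]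
          · by_cases hb9 : b = '9'
            · subst hb9; cases rest <;> simp [pvCoreA, pvCoreB, pvScanA, pvLookupB, PySem.Dict.get?, pvItems, s1, s2, s3, PySem.Chars.startswith, List.isPrefixOf, List.find?, List.find?_cons_of_neg, List.find?_cons_of_pos]
            · cases rest <;> simp [pvCoreA, pvCoreB, pvScanA, pvLookupB, PySem.Dict.get?, pvItems, s1, s2, s3, PySem.Chars.startswith, List.isPrefixOf, List.find?, List.find?_cons_of_neg, List.find?_cons_of_pos, hb4, Ne.symm hb4, pvBeqF hb4, pvBeqF' hb4, hb9, Ne.symm hb9, pvBeqF hb9, pvBeqF' hb9]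
        · by_cases h6 : a = '6'
          · subst h6
            by_cases hb1 : b = '1'
            · subst hb1; cases rest <;> simp [pvCoreA, pvCoreB, pvScanA, pvLookupB, PySem.Dict.get?, pvItems, s1, s2, s3, PySem.Chars.startswith, List.isPrefixOf, List.find?, List.find?_cons_of_neg, List.find?_cons_of_pos]
            · cases rest <;> simp [pvCoreA, pvCoreB, pvScanA, pvLookupB, PySem.Dict.get?, pvItems, s1, s2, s3, PySem.Chars.startswith, List.isPrefixOf, List.find?, List.find?_cons_of_neg, List.find?_cons_of_pos, hb1, Ne.symm hb1, pvBeqF hb1, pvBeqF' hb1]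
          · by_cases h1 : a = '1'
            · subst h1; cases rest <;> simp [pvCoreA, pvCoreB, pvScanA, pvLookupB, PySem.Dict.get?, pvItems, s1, s2, s3, PySem.Chars.startswith, List.isPrefixOf, List.find?, List.find?_cons_of_neg, List.find?_cons_of_pos]
            · cases rest <;> simp [pvCoreA, pvCoreB, pvScanA, pvLookupB, PySem.Dict.get?, pvItems, s1, s2, s3, PySem.Chars.startswith, List.isPrefixOf, List.find?, List.find?_cons_of_neg, List.find?_cons_of_pos, h5, Ne.symm h5, pvBeqF h5, pvBeqF' h5, h3, Ne.symm h3, pvBeqF h3, pvBeqF' h3, h4, Ne.symm h4, pvBeqF h4, pvBeqF' h4, h6, Ne.symm h6, pvBeqF h6, pvBeqF' h6, h1, Ne.symm h1, pvBeqF h1, pvBeqF' h1]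

-- ===== VERDICT (by name: the statement is the Claim_ definition above) =====
theorem language_from_phone_spec : Claim_equal_language_from_phone := by
  intro phone _
  show _ = _
  unfold language_from_phone language_from_phone_alt
  exact pvCore_eq _
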